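-- pv_equiv track=rewrite | github.com/AriannaBi/Algorithms-Data-Structures | exercise/164.py | Minimal_Simplified_Subset
-- ===== SOURCE A (Python) =====
-- def Minimal_Simplified_Subset(A):
--     X = []
--     A.sort()
--     B = [0]*len(A)
--     for i in range(0, len(A)):
--         j = 0
--         k = 0
--         while k < len(A):
--             if A[k] - A[j] < A[i]:
--                 k = k + 1
--             elif A[k] - A[j] > A[i]:
--                 j = j + 1
--             else:
--                 B[k] = 1
--                 k = k + 1
--     for i in range(0, len(A)):
--         if B[i] == 0:
--             X.append(A[i])
--     return X
-- ===== SOURCE B (Python) =====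
-- def Minimal_Simplified_Subset(A):
--     A.sort()
--     S = {x + y for x in A for y in A}
--     return [a for a in A if a not in S]
-- ===== Notes on version B (the rewrite author's own statement) =====
-- stated objective: simpler
-- what changed: Replaces the per-element two-pointer difference sweep over a marking array with explicit construction of the pairwise sumset as a set followed by a single membership-filter pass over the sorted list.
import Mathlib
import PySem

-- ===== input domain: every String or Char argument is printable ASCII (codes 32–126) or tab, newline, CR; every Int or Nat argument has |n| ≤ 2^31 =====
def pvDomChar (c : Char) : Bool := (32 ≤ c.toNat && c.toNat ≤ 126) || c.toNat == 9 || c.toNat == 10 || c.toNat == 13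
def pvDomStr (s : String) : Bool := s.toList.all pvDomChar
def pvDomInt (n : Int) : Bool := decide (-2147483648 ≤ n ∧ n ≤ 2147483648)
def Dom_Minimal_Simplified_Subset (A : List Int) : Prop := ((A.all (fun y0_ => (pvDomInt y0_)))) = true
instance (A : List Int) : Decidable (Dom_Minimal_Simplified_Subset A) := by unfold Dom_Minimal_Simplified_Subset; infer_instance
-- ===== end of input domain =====

-- B replaces A's per-element two-pointer difference sweep by building the pairwise sumset
-- once and filtering the sorted list (objective: simpler). Equivalence is about the RETURN
-- value; both A and B sort the argument list in place.

-- ===== PORT A =====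
-- inner while loop of A: two-pointer sweep for a fixed A[i] = ai, marking B[k] := 1.
-- On a negative-containing list Python's j runs past the end and raises IndexError;
-- that is the `none` branch below (unreachable under Pre_, which excludes it).
def pvInner (As : List Int) (ai : Int) (Bv : List Int) (j k : Nat) : List Int :=
  if hk : k < As.length then
    match hj : As[j]? with
    | none => Bv  -- Python: IndexError (outside Pre_)
    | some aj =>
      if As[k] - aj < ai then pvInner As ai Bv j (k + 1)
      else if As[k] - aj > ai then pvInner As ai Bv (j + 1) k
      else pvInner As ai (Bv.set k 1) j (k + 1)
  else Bv
termination_by (As.length - k) + (As.length - j)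
decreasing_by
  · omega
  · obtain ⟨h, -⟩ := List.getElem?_eq_some_iff.mp hj; omega
  · omega

def Minimal_Simplified_Subset (A : List Int) : List Int :=
  let As := PySem.List.sorted A (fun x => x) false
  let B0 := List.replicate As.length (0 : Int)
  let Bv := (List.range As.length).foldl (fun Bv i => pvInner As (As.getD i 0) Bv 0 0) B0
  -- indices produced by range are in range, so getD is exact for A[i]
  (List.range As.length).foldl
    (fun X i => if Bv.getD i 0 == 0 then X ++ [As.getD i 0] else X) []

-- ===== PORT B =====
def Minimal_Simplified_Subset_alt (A : List Int) : List Int :=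
  let As := PySem.List.sorted A (fun x => x) false
  let S : PySem.Set Int := PySem.Set.ofList (As.flatMap (fun x => As.map (fun y => x + y)))
  As.filter (fun a => !(PySem.Set.contains S a))

-- ===== PRECONDITION & SPEC =====
-- Pre_ excludes exactly the lists containing a negative element: on those the Python A
-- raises IndexError (the j pointer runs off the end of the list).
def Pre_Minimal_Simplified_Subset (A : List Int) : Prop := ∀ x ∈ A, 0 ≤ x
instance (A : List Int) : Decidable (Pre_Minimal_Simplified_Subset A) := by
  unfold Pre_Minimal_Simplified_Subset; infer_instance

def pvWitness_Minimal_Simplified_Subset : List Int := [2, 4, 1]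

def Spec_Minimal_Simplified_Subset (A : List Int) (out : List Int) : Prop :=
  out = Minimal_Simplified_Subset_alt A
instance (A : List Int) (out : List Int) : Decidable (Spec_Minimal_Simplified_Subset A out) := by
  unfold Spec_Minimal_Simplified_Subset; infer_instance

-- ===== CLAIM (what is proved, stated in full; the proofs are below) =====
def Claim_equal_Minimal_Simplified_Subset : Prop :=
  ∀ (A : List Int), Dom_Minimal_Simplified_Subset A → Pre_Minimal_Simplified_Subset A →
    Spec_Minimal_Simplified_Subset A (Minimal_Simplified_Subset A)

-- ===== LEMMAS AND PROOFS =====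

-- monotone indexing of a sorted list
theorem sorted_getElem_mono (As : List Int) (hs : As.Pairwise (· ≤ ·))
    {p q : Nat} (hpq : p ≤ q) (hq : q < As.length) : As[p]'(by omega) ≤ As[q] := by
  rcases Nat.eq_or_lt_of_le hpq with h | h
  · subst h; rfl
  · exact (List.pairwise_iff_getElem.mp hs) p q (by omega) hq h

theorem pvInner_getD (As : List Int) (ai : Int) (Bv : List Int)
    (hs : As.Pairwise (· ≤ ·)) (hai : 0 ≤ ai) (j k : Nat)
    (hBl : As.length ≤ Bv.length)
    (hinv : ∀ j' (_ : j' < j) (hj' : j' < As.length) (hk : k < As.length),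
      As[j'] < As[k] - ai) (k' : Nat) :
    (pvInner As ai Bv j k).getD k' 0 =
      if k ≤ k' ∧ ∃ hk' : k' < As.length, ∃ x ∈ As, x = As[k'] - ai then 1
      else Bv.getD k' 0 := by
  rw [pvInner]
  by_cases hk : k < As.length
  · rw [dif_pos hk]
    split
    next hj =>
      have hjlen : As.length ≤ j := by
        have := List.getElem?_eq_none_iff.mp hj; omega
      have hcon := hinv k (by omega) hk hk
      exact absurd hcon (by omega)
    next aj hj =>
      obtain ⟨hjlen, haj⟩ := List.getElem?_eq_some_iff.mp hj
      by_cases h1 : As[k] - aj < ai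
      · rw [if_pos h1]
        have hinv' : ∀ j' (_ : j' < j) (hj' : j' < As.length)
            (hk1 : k + 1 < As.length), As[j'] < As[k + 1] - ai := by
          intro j' hjj hj' hk1
          have := hinv j' hjj hj' hk
          have := sorted_getElem_mono As hs (p := k) (q := k + 1) (by omega) hk1
          omega
        rw [pvInner_getD As ai Bv hs hai j (k + 1) hBl hinv' k']
        have hnot : ¬ ∃ x ∈ As, x = As[k] - ai := by
          rintro ⟨x, hx, hxe⟩
          obtain ⟨j'', hj'', he⟩ := List.mem_iff_getElem.mp hx
          by_cases hj2 : j'' < j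
          · have := hinv j'' hj2 hj'' hk; omega
          · have := sorted_getElem_mono As hs (Nat.le_of_not_lt hj2) hj''
            rw [haj] at this; omega
        split_ifs with hA hB hB
        · rfl
        · exact absurd ⟨by omega, hA.2⟩ hB
        · rcases Nat.eq_or_lt_of_le hB.1 with h | h
          · subst h
            obtain ⟨hk'', hw⟩ := hB.2
            exact absurd hw hnot
          · exact absurd ⟨by omega, hB.2⟩ hA
        · rfl
      · rw [if_neg h1]
        by_cases h2 : As[k] - aj > ai
        · rw [if_pos h2]
          have hinv' : ∀ j' (_ : j' < j + 1) (hj' : j' < As.length)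
              (hk0 : k < As.length), As[j'] < As[k] - ai := by
            intro j' hjj hj' hk0
            by_cases hje : j' < j
            · exact hinv j' hje hj' hk0
            · have : j' = j := by omega
              subst this; rw [haj]; omega
          rw [pvInner_getD As ai Bv hs hai (j + 1) k hBl hinv' k']
        · rw [if_neg h2]
          have heq : aj = As[k] - ai := by omega
          have hinv' : ∀ j' (_ : j' < j) (hj' : j' < As.length)
              (hk1 : k + 1 < As.length), As[j'] < As[k + 1] - ai := by
            intro j' hjj hj' hk1
            have := hinv j' hjj hj' hk
            have := sorted_getElem_mono As hs (p := k) (q := k + 1) (by omega) hk1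
            omega
          rw [pvInner_getD As ai (Bv.set k 1) hs hai j (k + 1)
              (by simpa using hBl) hinv' k']
          have hhit : ∃ x ∈ As, x = As[k] - ai :=
            ⟨aj, haj ▸ List.getElem_mem hjlen, heq⟩
          by_cases hc : k' = k
          · subst hc
            rw [if_neg (by omega), if_pos ⟨le_refl k', hk, hhit⟩]
            have : k' < Bv.length := by omega
            simp [List.getD, this]
          · have hset : (Bv.set k 1).getD k' 0 = Bv.getD k' 0 := by
              simp [List.getD, Ne.symm hc]
            rw [hset]
            split_ifs with hA hB hB
            · rfl
            · exact absurd ⟨by omega, hA.2⟩ hB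
            · exact absurd ⟨by omega, hB.2⟩ hA
            · rfl
  · rw [dif_neg hk]
    rw [if_neg]
    rintro ⟨hkk, hk', -⟩
    omega
termination_by (As.length - k) + (As.length - j)
decreasing_by
  · omega
  · omega
  · omega

theorem pvInner_length (As : List Int) (ai : Int) (Bv : List Int) (j k : Nat) :
    (pvInner As ai Bv j k).length = Bv.length := by
  fun_induction pvInner As ai Bv j k <;> simp_all

theorem foldl_pvInner_getD (As : List Int) (hs : As.Pairwise (· ≤ ·))
    (hpos : ∀ x ∈ As, 0 ≤ x) (L : List Nat) :
    ∀ (Bv : List Int), As.length ≤ Bv.length → (∀ i ∈ L, i < As.length) → ∀ (k' : Nat),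
    (L.foldl (fun Bv i => pvInner As (As.getD i 0) Bv 0 0) Bv).getD k' 0 =
      if ∃ _ : k' < As.length, ∃ i ∈ L, ∃ x ∈ As, x = As.getD k' 0 - As.getD i 0 then 1
      else Bv.getD k' 0 := by
  induction L with
  | nil => intro Bv _ _ k'; simp
  | cons i L IH =>
    intro Bv hBl hL k'
    have hilen : i < As.length := hL i List.mem_cons_self
    have hiD : As.getD i 0 = As[i] := List.getD_eq_getElem As 0 hilen
    have hai : 0 ≤ As.getD i 0 := by rw [hiD]; exact hpos _ (List.getElem_mem hilen)
    rw [List.foldl_cons]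
    rw [IH (pvInner As (As.getD i 0) Bv 0 0) (by rw [pvInner_length]; exact hBl)
        (fun j hj => hL j (List.mem_cons_of_mem _ hj)) k']
    rw [pvInner_getD As (As.getD i 0) Bv hs hai 0 0 hBl (by intro j' hj'; omega) k']
    by_cases hk' : k' < As.length
    · have hkD : As.getD k' 0 = As[k'] := List.getD_eq_getElem As 0 hk'
      by_cases hQ : ∃ x ∈ As, x = As[k'] - As.getD i 0
      · by_cases hP : ∃ i' ∈ L, ∃ x ∈ As, x = As.getD k' 0 - As.getD i' 0
        · have hR : ∃ i' ∈ i :: L, ∃ x ∈ As, x = As.getD k' 0 - As.getD i' 0 := by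
            obtain ⟨i', hi', hx⟩ := hP
            exact ⟨i', List.mem_cons_of_mem _ hi', hx⟩
          rw [if_pos ⟨hk', hP⟩, if_pos ⟨hk', hR⟩]
        · have hR : ∃ i' ∈ i :: L, ∃ x ∈ As, x = As.getD k' 0 - As.getD i' 0 :=
            ⟨i, List.mem_cons_self, by rw [hkD]; exact hQ⟩
          rw [if_neg (fun h => hP h.2), if_pos ⟨Nat.zero_le _, hk', hQ⟩,
            if_pos ⟨hk', hR⟩]
      · by_cases hP : ∃ i' ∈ L, ∃ x ∈ As, x = As.getD k' 0 - As.getD i' 0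
        · have hR : ∃ i' ∈ i :: L, ∃ x ∈ As, x = As.getD k' 0 - As.getD i' 0 := by
            obtain ⟨i', hi', hx⟩ := hP
            exact ⟨i', List.mem_cons_of_mem _ hi', hx⟩
          rw [if_pos ⟨hk', hP⟩, if_pos ⟨hk', hR⟩]
        · have hR : ¬ ∃ i' ∈ i :: L, ∃ x ∈ As, x = As.getD k' 0 - As.getD i' 0 := by
            rintro ⟨i', hi', hx⟩
            rcases List.mem_cons.mp hi' with h | h
            · subst h; exact hQ (by rw [← hkD]; exact hx)
            · exact hP ⟨i', h, hx⟩
          rw [if_neg (fun h => hP h.2), if_neg (fun h => hQ h.2.2),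
            if_neg (fun h => hR h.2)]
    · rw [if_neg (by rintro ⟨h, -⟩; exact hk' h)]
      rw [if_neg (by rintro ⟨-, h, -⟩; exact hk' h)]
      rw [if_neg (by rintro ⟨h, -⟩; exact hk' h)]

theorem range_filter_map (l : List Int) (q : Int → Bool) :
    ((List.range l.length).filter (fun i => q (l.getD i 0))).map (fun i => l.getD i 0)
      = l.filter q := by
  induction l with
  | nil => simp
  | cons x t IH =>
    simp only [List.length_cons, List.range_succ_eq_map, List.filter_cons,
      List.getD_cons_zero, List.filter_map, Function.comp_def, List.getD_cons_succ]
    simp only [List.getD] at IH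
    cases hqx : q x <;> simp [Function.comp_def, List.getD, IH]

-- ===== VERDICT =====
theorem Minimal_Simplified_Subset_spec : Claim_equal_Minimal_Simplified_Subset := by
  intro A _ hpre
  unfold Spec_Minimal_Simplified_Subset Minimal_Simplified_Subset Minimal_Simplified_Subset_alt
  simp only []
  set As := PySem.List.sorted A (fun x => x) false with hAs
  have hs : As.Pairwise (· ≤ ·) := by simpa using PySem.List.sorted_pairwise A (fun x => x)
  have hpos : ∀ x ∈ As, 0 ≤ x :=
    fun x hx => hpre x ((PySem.List.mem_sorted A (fun x => x) false x).mp hx)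
  set q : Int → Bool :=
    fun a => !(PySem.Set.ofList (As.flatMap fun x => As.map fun y => x + y)).contains a
    with hq
  rw [PySem.List.foldl_append_if]
  rw [List.filter_congr (fun i hi => ?_), range_filter_map As q]
  · rfl
  · -- pointwise: the mark test equals the sumset-membership test on the value
    have hilen : i < As.length := List.mem_range.mp hi
    rw [foldl_pvInner_getD As hs hpos (List.range As.length)
        (List.replicate As.length 0) (by simp) (fun j hj => List.mem_range.mp hj) i]
    have hmem : (∃ _ : i < As.length, ∃ i' ∈ List.range As.length, ∃ x ∈ As,
        x = As.getD i 0 - As.getD i' 0) ↔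
        (As.getD i 0 ∈ As.flatMap fun x => As.map fun y => x + y) := by
      rw [List.mem_flatMap]
      constructor
      · rintro ⟨-, i', hi', x, hx, hxe⟩
        have hi'len : i' < As.length := List.mem_range.mp hi'
        refine ⟨x, hx, ?_⟩
        rw [List.mem_map]
        refine ⟨As.getD i' 0, ?_, by omega⟩
        rw [List.getD_eq_getElem As 0 hi'len]
        exact List.getElem_mem hi'len
      · rintro ⟨x, hx, hmem⟩
        obtain ⟨y, hy, hae⟩ := List.mem_map.mp hmem
        obtain ⟨i', hi'len, he⟩ := List.mem_iff_getElem.mp hy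
        refine ⟨hilen, i', List.mem_range.mpr hi'len, x, hx, ?_⟩
        rw [List.getD_eq_getElem As 0 hi'len, he]
        omega
    by_cases hc : As.getD i 0 ∈ As.flatMap fun x => As.map fun y => x + y
    · rw [if_pos (hmem.mpr hc)]
      simp only [List.mem_flatMap, List.mem_map, List.getD] at hc
      obtain ⟨x, hx, y, hy, he⟩ := hc
      simp [hq, PySem.Set.contains, PySem.Set.mem_ofList]
      exact ⟨x, hx, y, hy, he⟩
    · rw [if_neg (fun h => hc (hmem.mp h))]
      simp only [List.mem_flatMap, List.mem_map, List.getD] at hc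
      push Not at hc
      simp [hq, PySem.Set.contains, PySem.Set.mem_ofList]
      intro x hx y hy he
      exact hc x hx y hy he
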